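-- pv_equiv track=rewrite | github.com/deboramelinda94/KGConstructionFromTextbook | ConstructKG_From_ContentOfTextbook/ParagraphSummarization.py | scoreByPosition
-- ===== SOURCE A (Python) =====
-- import math
-- import math
--
-- def scoreByPosition(sentColl, scoreArray):
--     countSent = len(sentColl)
--     midSent = math.ceil(countSent/2)
--
--     if countSent % 2 == 1:
--         themid = midSent -1
--         for i in range(len(sentColl)-1, themid, -1):
--             scoreArray[i] += countSent
--             countSent -= 1
--     else:
--         themid = midSent
--         for i in range(len(sentColl)-1, themid-1, -1):
--             scoreArray[i] += countSent
--             countSent -= 1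
--
--     for i in range(themid):
--         scoreArray[i] += countSent
--         countSent -= 1
--
--     return scoreArray
-- ===== SOURCE B (Python) =====
-- def scoreByPosition(sentColl, scoreArray):
--     n = len(sentColl)
--     mid = (n + 1) // 2
--     for i in range(n):
--         if 2 * i + 1 > n:          # upper half: position score i+1
--             scoreArray[i] += i + 1
--         elif 2 * i + 1 < n:        # lower half: position score mid-i
--             scoreArray[i] += mid - i
--         # exact middle of an odd-length list gets no position score
--     return scoreArray
-- ===== Notes on version B (the rewrite author's own statement) =====
-- stated objective: simpler
-- what changed: Replaces A's two descending loops threading a shared decrementing counter with one ascending pass that adds each index's position score from a closed-form formula (i+1 for the upper half, mid-i for the lower half, 0 at an odd middle).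
import Mathlib
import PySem

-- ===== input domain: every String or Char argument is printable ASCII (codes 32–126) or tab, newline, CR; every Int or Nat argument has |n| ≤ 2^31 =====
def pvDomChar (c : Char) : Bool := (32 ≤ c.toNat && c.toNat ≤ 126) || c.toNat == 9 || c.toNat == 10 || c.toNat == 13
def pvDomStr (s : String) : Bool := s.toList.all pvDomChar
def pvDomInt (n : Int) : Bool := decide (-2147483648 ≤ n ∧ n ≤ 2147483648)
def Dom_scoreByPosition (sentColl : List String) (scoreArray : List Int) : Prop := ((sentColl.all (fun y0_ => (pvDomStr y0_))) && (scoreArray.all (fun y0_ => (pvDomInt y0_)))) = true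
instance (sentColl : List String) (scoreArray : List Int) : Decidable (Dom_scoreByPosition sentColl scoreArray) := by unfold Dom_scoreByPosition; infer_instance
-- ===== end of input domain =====

-- B replaces A's two descending loops threading a shared decrementing counter with one
-- ascending pass adding a closed-form position score per index (objective: simpler).
-- Both A and B mutate scoreArray in place in Python; the equivalence proved here is about
-- the returned value (the mutation performed is the same).

-- ===== PORT A =====
def scoreByPosition (sentColl : List String) (scoreArray : List Int) : List Int :=
  let countSent : Int := (sentColl.length : Int)
  -- math.ceil(countSent/2): for an int argument exactly ceiling division -((-countSent) // 2)
  let midSent : Int := -(PySem.Int.floordiv (-countSent) 2)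
  let tst : Int × (List Int × Int) :=
    if PySem.Int.mod countSent 2 == 1 then
      let themid := midSent - 1
      (themid,
        (PySem.List.pyRange ((sentColl.length : Int) - 1) themid (-1)).foldl
          (fun (p : List Int × Int) i =>
            (PySem.List.pySetD p.1 i (PySem.List.pyGetD p.1 i 0 + p.2), p.2 - 1))
          (scoreArray, countSent))
    else
      let themid := midSent
      (themid,
        (PySem.List.pyRange ((sentColl.length : Int) - 1) (themid - 1) (-1)).foldl
          (fun (p : List Int × Int) i =>
            (PySem.List.pySetD p.1 i (PySem.List.pyGetD p.1 i 0 + p.2), p.2 - 1))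
          (scoreArray, countSent))
  ((PySem.List.pyRange 0 tst.1 1).foldl
    (fun (p : List Int × Int) i =>
      (PySem.List.pySetD p.1 i (PySem.List.pyGetD p.1 i 0 + p.2), p.2 - 1))
    tst.2).1

-- ===== PORT B =====
def scoreByPosition_alt (sentColl : List String) (scoreArray : List Int) : List Int :=
  let n : Int := (sentColl.length : Int)
  let mid : Int := PySem.Int.floordiv (n + 1) 2
  (PySem.List.pyRange 0 n 1).foldl
    (fun arr i =>
      if 2 * i + 1 > n then PySem.List.pySetD arr i (PySem.List.pyGetD arr i 0 + (i + 1))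
      else if 2 * i + 1 < n then PySem.List.pySetD arr i (PySem.List.pyGetD arr i 0 + (mid - i))
      else arr)
    scoreArray

-- ===== PRECONDITION & SPEC =====
-- Pre_ excludes exactly the inputs where Python A raises IndexError: scoreArray shorter than
-- sentColl with at least two sentences (with 0 or 1 sentences neither loop indexes scoreArray).
def Pre_scoreByPosition (sentColl : List String) (scoreArray : List Int) : Prop :=
  sentColl.length ≤ scoreArray.length ∨ sentColl.length ≤ 1
instance (sentColl : List String) (scoreArray : List Int) : Decidable (Pre_scoreByPosition sentColl scoreArray) := by unfold Pre_scoreByPosition; infer_instance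
def pvWitness_scoreByPosition : List String × List Int := (["a", "b", "c"], [0, 0, 0])

def Spec_scoreByPosition (sentColl : List String) (scoreArray : List Int) (out : List Int) : Prop := out = scoreByPosition_alt sentColl scoreArray
instance (sentColl : List String) (scoreArray : List Int) (out : List Int) : Decidable (Spec_scoreByPosition sentColl scoreArray out) := by unfold Spec_scoreByPosition; infer_instance

-- ===== CLAIM (what is proved, stated in full; the proofs are below) =====
def Claim_equal_scoreByPosition : Prop := ∀ (sentColl : List String) (scoreArray : List Int), Dom_scoreByPosition sentColl scoreArray → Pre_scoreByPosition sentColl scoreArray → Spec_scoreByPosition sentColl scoreArray (scoreByPosition sentColl scoreArray)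

-- ===== LEMMAS AND PROOFS =====

-- addIdx w j xs : add w (j+k) to the k-th element of xs
def addIdx (w : Nat → Int) : Nat → List Int → List Int
  | _, [] => []
  | j, x :: xs => (x + w j) :: addIdx w (j + 1) xs

theorem length_addIdx (w : Nat → Int) (j : Nat) (xs : List Int) :
    (addIdx w j xs).length = xs.length := by
  induction xs generalizing j with
  | nil => rfl
  | cons x xs ih => simp [addIdx, ih]

theorem getElem_addIdx (w : Nat → Int) (j : Nat) (xs : List Int) (k : Nat) (h : k < xs.length) :
    (addIdx w j xs)[k]'(by rw [length_addIdx]; exact h) = xs[k] + w (j + k) := by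
  induction xs generalizing j k with
  | nil => simp at h
  | cons x xs ih =>
    cases k with
    | zero => simp [addIdx]
    | succ k =>
      simp only [addIdx, List.getElem_cons_succ]
      rw [ih (j + 1) k (by simpa using h)]
      ring_nf

theorem addIdx_eq_self (w : Nat → Int) (j : Nat) (xs : List Int) (h : ∀ k, w k = 0) :
    addIdx w j xs = xs := by
  induction xs generalizing j with
  | nil => rfl
  | cons x xs ih => simp [addIdx, h, ih]

theorem addIdx_set (w : Nat → Int) (j k : Nat) (y : Int) (xs : List Int) :
    addIdx w j (xs.set k y) = (addIdx w j xs).set k (y + w (j + k)) := by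
  induction xs generalizing j k with
  | nil => rfl
  | cons x xs ih =>
    cases k with
    | zero => simp [addIdx]
    | succ k =>
      simp only [List.set_cons_succ, addIdx, ih]
      have : j + 1 + k = j + (k + 1) := by omega
      rw [this]

theorem addIdx_addIdx (w1 w2 : Nat → Int) (j : Nat) (xs : List Int) :
    addIdx w2 j (addIdx w1 j xs) = addIdx (fun k => w1 k + w2 k) j xs := by
  induction xs generalizing j with
  | nil => rfl
  | cons x xs ih => simp [addIdx, ih]; ring

-- setting index aN of (addIdx w' arr) to arr[aN] + v is addIdx with the weight updated at aN
theorem set_addIdx_eq (w' w'' : Nat → Int) (arr : List Int) (aN : Nat) (h : aN < arr.length)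
    (v : Int) (hw''a : w'' aN = v) (hother : ∀ j, j ≠ aN → w'' j = w' j) :
    (addIdx w' 0 arr).set aN (arr[aN] + v) = addIdx w'' 0 arr := by
  apply List.ext_getElem
  · simp [length_addIdx]
  · intro i h1 h2
    have hi : i < arr.length := by simpa [length_addIdx] using h2
    rw [List.getElem_set]
    by_cases hia : aN = i
    · subst hia
      rw [getElem_addIdx w'' 0 arr aN h]
      simp [hw''a]
    · rw [if_neg hia, getElem_addIdx w' 0 arr i hi, getElem_addIdx w'' 0 arr i hi]
      simp only [Nat.zero_add]
      rw [hother i (fun e => hia e.symm)]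

-- A's descending loop: range(a, b, -1) with counter starting at a+1
theorem foldl_desc (k : Nat) : ∀ (a b c : Int) (arr : List Int), (a - b).toNat = k →
    c = a + 1 → -1 ≤ b → b ≤ a → a < (arr.length : Int) →
    (PySem.List.pyRange a b (-1)).foldl
      (fun (p : List Int × Int) i =>
        (PySem.List.pySetD p.1 i (PySem.List.pyGetD p.1 i 0 + p.2), p.2 - 1))
      (arr, c)
    = (addIdx (fun j => if b < (j : Int) ∧ (j : Int) ≤ a then (j : Int) + 1 else 0) 0 arr, b + 1) := by
  induction k with
  | zero =>
    intro a b c arr hk hc hb hba ha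
    have hab : a = b := by omega
    rw [PySem.List.pyRange_neg_one_eq_nil (by omega)]
    simp only [List.foldl_nil]
    rw [addIdx_eq_self _ _ _ (fun j => by rw [if_neg (by omega)])]
    rw [hc, hab]
  | succ k ih =>
    intro a b c arr hk hc hb hba ha
    have hba' : b < a := by omega
    have ha0 : 0 ≤ a := by omega
    have haN : a.toNat < arr.length := by omega
    rw [PySem.List.pyRange_neg_one_cons hba']
    simp only [List.foldl_cons]
    rw [PySem.List.pySetD_of_nonneg _ _ ha0, PySem.List.pyGetD_eq_getElem _ _ ha0 (by omega)]
    have harr' : ((arr.set a.toNat (arr[a.toNat] + c)).length : Int) = (arr.length : Int) := by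
      simp
    rw [ih (a - 1) b (c - 1) _ (by omega) (by omega) hb (by omega) (by omega)]
    rw [addIdx_set, Prod.mk.injEq]
    refine ⟨?_, rfl⟩
    rw [if_neg (by omega), add_zero, hc]
    exact set_addIdx_eq _ _ arr a.toNat haN (a + 1)
      (by split_ifs <;> omega)
      (fun j hj => by split_ifs <;> omega)

-- A's ascending loop: range(a, t) with counter starting at c0 - a
theorem foldl_asc (k : Nat) : ∀ (a t c0 c : Int) (arr : List Int), (t - a).toNat = k →
    c = c0 - a → 0 ≤ a → t ≤ (arr.length : Int) →
    ((PySem.List.pyRange a t 1).foldl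
      (fun (p : List Int × Int) i =>
        (PySem.List.pySetD p.1 i (PySem.List.pyGetD p.1 i 0 + p.2), p.2 - 1))
      (arr, c)).1
    = addIdx (fun j => if a ≤ (j : Int) ∧ (j : Int) < t then c0 - (j : Int) else 0) 0 arr := by
  induction k with
  | zero =>
    intro a t c0 c arr hk hc ha ht
    rw [PySem.List.pyRange_one_eq_nil (by omega)]
    simp only [List.foldl_nil]
    rw [addIdx_eq_self _ _ _ (fun j => by rw [if_neg (by omega)])]
  | succ k ih =>
    intro a t c0 c arr hk hc ha ht
    have hat : a < t := by omega
    have haN : a.toNat < arr.length := by omega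
    rw [PySem.List.pyRange_one_cons hat]
    simp only [List.foldl_cons]
    rw [PySem.List.pySetD_of_nonneg _ _ ha, PySem.List.pyGetD_eq_getElem _ _ ha (by omega)]
    rw [ih (a + 1) t c0 (c - 1) _ (by omega) (by omega) (by omega) (by simpa using ht)]
    rw [addIdx_set, if_neg (by omega), add_zero, hc]
    exact set_addIdx_eq _ _ arr a.toNat haN (c0 - a)
      (by split_ifs <;> omega)
      (fun j hj => by split_ifs <;> omega)

-- B's single loop with the closed-form score per index
theorem foldl_B (k : Nat) (n mid : Int) : ∀ (a : Int) (arr : List Int), (n - a).toNat = k →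
    0 ≤ a → n ≤ (arr.length : Int) →
    (PySem.List.pyRange a n 1).foldl
      (fun arr i =>
        if 2 * i + 1 > n then PySem.List.pySetD arr i (PySem.List.pyGetD arr i 0 + (i + 1))
        else if 2 * i + 1 < n then PySem.List.pySetD arr i (PySem.List.pyGetD arr i 0 + (mid - i))
        else arr)
      arr
    = addIdx (fun j => if a ≤ (j : Int) ∧ (j : Int) < n then
        (if 2 * (j : Int) + 1 > n then (j : Int) + 1
         else if 2 * (j : Int) + 1 < n then mid - (j : Int) else 0) else 0) 0 arr := by
  induction k with
  | zero =>
    intro a arr hk ha hn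
    rw [PySem.List.pyRange_one_eq_nil (by omega)]
    simp only [List.foldl_nil]
    rw [addIdx_eq_self _ _ _ (fun j => by rw [if_neg (by omega)])]
  | succ k ih =>
    intro a arr hk ha hn
    have hat : a < n := by omega
    have haN : a.toNat < arr.length := by omega
    rw [PySem.List.pyRange_one_cons hat]
    simp only [List.foldl_cons]
    have hstep : ∀ (arr' : List Int) (w' : Nat → Int) (v : Int),
        w' a.toNat = 0 →
        arr' = arr.set a.toNat (arr[a.toNat] + v) →
        addIdx w' 0 arr' = addIdx (fun j => if (j : Nat) = a.toNat then v + w' j else w' j) 0 arr := by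
      intro arr' w' v hw0 harr'
      subst harr'
      rw [addIdx_set]
      simp only [Nat.zero_add, hw0, add_zero]
      exact set_addIdx_eq _ _ arr a.toNat haN v
        (by simp [hw0])
        (fun j hj => by rw [if_neg hj])
    by_cases h1 : 2 * a + 1 > n
    · rw [if_pos h1,
        PySem.List.pySetD_of_nonneg _ _ ha, PySem.List.pyGetD_eq_getElem _ _ ha (by omega),
        ih (a + 1) _ (by omega) (by omega) (by simpa using hn),
        hstep _ _ (a + 1) (by split_ifs <;> omega) (by simp)]
      congr 1; funext j
      split_ifs <;> omega
    · rw [if_neg h1]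
      by_cases h2 : 2 * a + 1 < n
      · rw [if_pos h2,
          PySem.List.pySetD_of_nonneg _ _ ha, PySem.List.pyGetD_eq_getElem _ _ ha (by omega),
          ih (a + 1) _ (by omega) (by omega) (by simpa using hn),
          hstep _ _ (mid - a) (by split_ifs <;> omega) (by simp)]
        congr 1; funext j
        split_ifs <;> omega
      · rw [if_neg h2, ih (a + 1) _ (by omega) (by omega) hn]
        congr 1; funext j
        split_ifs <;> omega

-- ===== VERDICT (by name: the statement is the Claim_ definition above) =====
theorem scoreByPosition_spec : Claim_equal_scoreByPosition := by
  intro s arr _ hpre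
  unfold Pre_scoreByPosition at hpre
  by_cases hsmall : arr.length < s.length
  · -- then sentColl has exactly one sentence and scoreArray is empty: no index is touched
    have hs1 : s.length = 1 := by omega
    have ha0 : arr = [] := by
      cases arr with
      | nil => rfl
      | cons x xs => simp at hsmall; omega
    subst ha0
    unfold Spec_scoreByPosition scoreByPosition scoreByPosition_alt
    simp only [hs1]
    decide
  unfold Spec_scoreByPosition scoreByPosition scoreByPosition_alt
  simp only []
  set n : Int := (s.length : Int) with hn
  have hn0 : 0 ≤ n := by positivity
  have hlen : n ≤ (arr.length : Int) := by omega
  set m : Int := -(PySem.Int.floordiv (-n) 2) with hm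
  have hmb : (m - 1) * 2 < n ∧ n ≤ m * 2 :=
    (PySem.Int.neg_floordiv_neg_eq_iff_of_pos (by omega)).mp hm.symm
  have hmid : PySem.Int.floordiv (n + 1) 2 = (n + 1) / 2 :=
    PySem.Int.floordiv_eq_ediv_of_pos (by omega)
  have hmod : PySem.Int.mod n 2 = n % 2 := PySem.Int.mod_eq_emod_of_pos (by omega)
  rw [foldl_B (n - 0).toNat n _ 0 arr rfl (by omega) hlen, hmid]
  by_cases hpar : PySem.Int.mod n 2 == 1
  · have hodd : n % 2 = 1 := by rwa [hmod, beq_iff_eq] at hpar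
    have hnm : n = 2 * m - 1 := by omega
    rw [if_pos hpar]
    simp only []
    rw [foldl_desc (n - 1 - (m - 1)).toNat (n - 1) (m - 1) n arr rfl (by omega) (by omega)
      (by omega) (by omega)]
    rw [foldl_asc ((m - 1) - 0).toNat 0 (m - 1) m _ _ rfl (by omega) (by omega)
      (by rw [length_addIdx]; omega)]
    rw [addIdx_addIdx]
    congr 1; funext j
    split_ifs <;> omega
  · have heven : n % 2 = 0 := by
      rw [hmod, beq_iff_eq] at hpar; omega
    have hnm : n = 2 * m := by omega
    rw [if_neg hpar]
    simp only []
    rw [foldl_desc (n - 1 - (m - 1)).toNat (n - 1) (m - 1) n arr rfl (by omega) (by omega)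
      (by omega) (by omega)]
    rw [foldl_asc (m - 0).toNat 0 m m _ _ rfl (by omega) (by omega)
      (by rw [length_addIdx]; omega)]
    rw [addIdx_addIdx]
    congr 1; funext j
    split_ifs <;> omega
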